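-- pv_equiv track=rewrite | github.com/Andruixxd31/binary_search_problems | python/easy/remove_last_duplicate_entry.py | solve
-- ===== SOURCE A (Python) =====
-- def solve(nums):
--     d = {}
--     for i, num in enumerate(nums):
--         if num not in d:
--             d[num] = -1
--         else:
--             d[num] = i
--
--     res = [x for i,x in enumerate(nums) if i != d[x]]
--     return res
-- ===== SOURCE B (Python) =====
-- def solve(nums):
--     # Keep index i unless it is the last occurrence of a value that occurs
--     # more than once: i.e. keep i iff the value reappears later, or never
--     # appeared before.  No dict / sentinel pass, just slice membership.
--     return [x for i, x in enumerate(nums) if x in nums[i+1:] or x not in nums[:i]]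
-- ===== Notes on version B (the rewrite author's own statement) =====
-- stated objective: simpler
-- what changed: Replaces A's sentinel-encoding dict pass (last index stored for duplicates, -1 for singletons) by a direct one-line characterization: keep element i iff its value reappears in nums[i+1:] or does not appear in nums[:i].
import Mathlib
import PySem

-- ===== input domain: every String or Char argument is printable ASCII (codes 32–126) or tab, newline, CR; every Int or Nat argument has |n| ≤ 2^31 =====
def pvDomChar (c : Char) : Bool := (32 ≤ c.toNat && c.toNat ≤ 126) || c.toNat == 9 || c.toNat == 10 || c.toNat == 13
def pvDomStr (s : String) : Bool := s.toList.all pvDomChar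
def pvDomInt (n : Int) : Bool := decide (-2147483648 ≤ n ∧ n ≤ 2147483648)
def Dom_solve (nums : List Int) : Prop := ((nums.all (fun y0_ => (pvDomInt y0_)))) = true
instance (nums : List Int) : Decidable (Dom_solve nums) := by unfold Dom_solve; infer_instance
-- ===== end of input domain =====

-- B replaces A's sentinel-encoding dict pass by a one-line slice-membership test (simpler, no dict).


-- ===== PORT A =====
def solveDict (nums : List Int) : PySem.Dict Int Int :=
  (PySem.List.enumerate nums 0).foldl
    (fun d p => if d.contains p.2 = false then d.insert p.2 (-1) else d.insert p.2 p.1)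
    PySem.Dict.empty

def solve (nums : List Int) : List Int :=
  -- d[x]: the key is always present (every element of nums was inserted), so getD is exact here
  ((PySem.List.enumerate nums 0).filter
    (fun p => decide (p.1 ≠ (solveDict nums).getD p.2 (-2)))).map (·.2)

-- ===== PORT B =====
def solve_alt (nums : List Int) : List Int :=
  ((PySem.List.enumerate nums 0).filter
    (fun p => (PySem.List.slice nums (some (p.1 + 1)) none).contains p.2
              || !((PySem.List.slice nums none (some p.1)).contains p.2))).map (·.2)

-- ===== PRECONDITION & SPEC =====
def Spec_solve (nums : List Int) (out : List Int) : Prop := out = solve_alt nums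
instance (nums : List Int) (out : List Int) : Decidable (Spec_solve nums out) := by unfold Spec_solve; infer_instance

-- ===== CLAIM (what is proved, stated in full; the proofs are below) =====
def Claim_equal_solve : Prop := ∀ (nums : List Int), Dom_solve nums → Spec_solve nums (solve nums)

-- ===== LEMMAS AND PROOFS =====

/-- `j` is the index of the last occurrence of `x` in `nums`. -/
def IsLastOcc (nums : List Int) (x : Int) (j : Nat) : Prop :=
  nums[j]? = some x ∧ x ∉ nums.drop (j + 1)

lemma mem_drop_of_lt {nums : List Int} {x : Int} {a b : Nat}
    (hab : a < b) (hb : nums[b]? = some x) : x ∈ nums.drop (a + 1) := by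
  have : (nums.drop (a + 1))[b - (a + 1)]? = some x := by
    rw [List.getElem?_drop]
    have : a + 1 + (b - (a + 1)) = b := by omega
    rw [this]; exact hb
  exact List.mem_of_getElem? this

lemma exists_last_occ {nums : List Int} {x : Int} (h : x ∈ nums) :
    ∃ j, IsLastOcc nums x j := by
  induction nums with
  | nil => simp at h
  | cons y t ih =>
    by_cases hxt : x ∈ t
    · obtain ⟨j, hj1, hj2⟩ := ih hxt
      exact ⟨j + 1, by simpa using hj1, by simpa using hj2⟩
    · have hxy : x = y := by
        rcases List.mem_cons.mp h with h' | h'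
        · exact h'
        · exact absurd h' hxt
      exact ⟨0, by simp [hxy], by simpa using hxt⟩

lemma solveDict_spec (nums : List Int) : ∀ (x : Int),
    ((solveDict nums).contains x = true ↔ x ∈ nums) ∧
    (∀ j, IsLastOcc nums x j →
      (solveDict nums).get? x = some (if x ∈ nums.take j then (j : Int) else -1)) := by
  induction nums using List.reverseRecOn with
  | nil =>
    intro x
    constructor
    · simp [solveDict, PySem.List.enumerate_nil, PySem.Dict.contains_empty]
    · intro j hj
      simp [IsLastOcc] at hj
  | append_singleton l a ih =>
    have hstep : solveDict (l ++ [a]) =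
        (if (solveDict l).contains a = false then (solveDict l).insert a (-1)
         else (solveDict l).insert a ((0 : Int) + l.length)) := by
      simp [solveDict, PySem.List.enumerate_append, List.foldl_append,
        PySem.List.enumerate_cons, PySem.List.enumerate_nil]
    intro x
    constructor
    · rw [hstep]
      by_cases hc : (solveDict l).contains a = true
      · have hal : a ∈ l := ((ih a).1).mp hc
        simp [hc, PySem.Dict.contains_insert]
        by_cases hx : x = a
        · simp [hx, hal]
        · simp [hx, (ih x).1]
      · have hc' : (solveDict l).contains a = false := by
          cases h : (solveDict l).contains a
          · rfl
          · exact absurd h hc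
        simp [hc', PySem.Dict.contains_insert]
        by_cases hx : x = a
        · simp [hx]
        · simp [hx, (ih x).1]
    · intro j hj
      obtain ⟨hj1, hj2⟩ := hj
      by_cases hx : x = a
      · subst hx
        -- the last occurrence of x in l ++ [x] is at index l.length
        have hjlen : j = l.length := by
          by_contra hne
          have hjlt : j < (l ++ [x]).length := (List.getElem?_eq_some_iff.mp hj1).1
          have hjle : j < l.length := by
            simp [List.length_append] at hjlt; omega
          have : x ∈ (l ++ [x]).drop (j + 1) := by
            apply mem_drop_of_lt hjle
            simp
          exact hj2 this
        subst hjlen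
        have htake : (l ++ [x]).take l.length = l := by
          simp
        rw [hstep]
        by_cases hal : x ∈ l
        · have hc : (solveDict l).contains x = true := ((ih x).1).mpr hal
          simp [hc, htake, hal, PySem.Dict.get?_insert_self]
        · have hc : (solveDict l).contains x = false := by
            cases h : (solveDict l).contains x
            · rfl
            · exact absurd (((ih x).1).mp h) hal
          simp [hc, htake, hal, PySem.Dict.get?_insert_self]
      · -- x ≠ a : lookup and last occurrence both reduce to l
        have hjlt : j < (l ++ [a]).length := (List.getElem?_eq_some_iff.mp hj1).1
        have hjle : j < l.length := by
          by_contra hge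
          have : j = l.length := by simp [List.length_append] at hjlt; omega
          subst this
          have : (l ++ [a])[l.length]? = some a := by
            simp
          rw [this] at hj1
          exact hx (Option.some.inj hj1).symm
        have hj1' : l[j]? = some x := by
          rwa [List.getElem?_append_left hjle] at hj1
        have hj2' : x ∉ l.drop (j + 1) := by
          intro hmem
          exact hj2 (by rw [List.drop_append_of_le_length (by omega)]; exact List.mem_append_left _ hmem)
        have hlast : IsLastOcc l x j := ⟨hj1', hj2'⟩
        have htake : (l ++ [a]).take j = l.take j := List.take_append_of_le_length (by omega)
        rw [hstep, htake]
        have hget := (ih x).2 j hlast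
        by_cases hc : (solveDict l).contains a = true
        · simp [hc, PySem.Dict.get?_insert_of_ne _ _ hx, hget]
        · have hc' : (solveDict l).contains a = false := by
            cases h : (solveDict l).contains a
            · rfl
            · exact absurd h hc
          simp [hc', PySem.Dict.get?_insert_of_ne _ _ hx, hget]

lemma filter_conditions_agree (nums : List Int) (k : Nat) (hk : k < nums.length) :
    (decide ((0 + (k : Int)) ≠ (solveDict nums).getD nums[k] (-2))) =
    ((PySem.List.slice nums (some ((0 + (k : Int)) + 1)) none).contains nums[k]
      || !((PySem.List.slice nums none (some (0 + (k : Int)))).contains nums[k])) := by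
  set x := nums[k] with hxdef
  have hxmem : x ∈ nums := List.getElem_mem hk
  obtain ⟨j, hj⟩ := exists_last_occ hxmem
  have hget := (solveDict_spec nums x).2 j hj
  have hgetD : (solveDict nums).getD x (-2) = (if x ∈ nums.take j then (j : Int) else -1) := by
    rw [PySem.Dict.getD_eq_get?_getD, hget]; rfl
  -- rewrite B's slices as drop/take
  have hslice1 : PySem.List.slice nums (some ((0 + (k : Int)) + 1)) none = nums.drop (k + 1) := by
    have : (0 + (k : Int)) + 1 = ((k + 1 : Nat) : Int) := by push_cast [Nat.cast_add]; ring
    rw [this, PySem.List.slice_from_natCast]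
  have hslice2 : PySem.List.slice nums none (some (0 + (k : Int))) = nums.take k := by
    have : (0 + (k : Int)) = ((k : Nat) : Int) := by ring
    rw [this, PySem.List.slice_to_natCast]
  rw [hslice1, hslice2, hgetD]
  -- facts about k versus the last occurrence j
  obtain ⟨hj1, hj2⟩ := hj
  have hkx : nums[k]? = some x := by simp [hxdef, List.getElem?_eq_getElem hk]
  have hklej : k ≠ j → k < j := by
    intro hne
    by_contra hge
    exact hj2 (mem_drop_of_lt (by omega) hkx)
  rw [Bool.eq_iff_iff]
  simp only [decide_eq_true_eq, Bool.or_eq_true, Bool.not_eq_true',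
    List.contains_eq_mem, decide_eq_true_eq, decide_eq_false_iff_not]
  by_cases htj : x ∈ nums.take j
  · simp only [htj, if_true]
    constructor
    · intro hne
      have hkj : k ≠ j := fun h => hne (by rw [h]; ring)
      exact Or.inl (mem_drop_of_lt (hklej hkj) hj1)
    · rintro (hdrop | htake) heq
      · have hkj : k = j := by omega
        subst hkj; exact hj2 hdrop
      · have hkj : k = j := by omega
        subst hkj; exact htake htj
  · simp only [htj, if_false]
    constructor
    · intro _
      by_cases hkj : k = j
      · subst hkj; exact Or.inr htj
      · exact Or.inl (mem_drop_of_lt (hklej hkj) hj1)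
    · intro _ heq
      omega

-- ===== VERDICT (by name: the statement is the Claim_ definition above) =====
theorem solve_spec : Claim_equal_solve := by
  intro nums _
  unfold Spec_solve solve solve_alt
  congr 1
  apply List.filter_congr
  intro p hp
  obtain ⟨k, hk, hpe⟩ := (PySem.List.mem_enumerate_iff _ _ _).mp hp
  subst hpe
  exact filter_conditions_agree nums k hk
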